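-- pv_equiv track=rewrite | github.com/RyoungJKT/varis | varis/m4_conservation/conservation_scorer.py | _map_position_to_column
-- ===== SOURCE A (Python) =====
-- from typing import Optional
--
-- def _map_position_to_column(
--     query_row: str,
--     position: int,
--     expected_aa: Optional[str] = None,
-- ) -> Optional[int]:
--     """Map a 1-indexed residue position to a 0-indexed alignment column.
--
--     Walks the aligned query sequence, counting only non-gap characters.
--     When the count reaches ``position``, the current column index is returned.
--     Gaps ('-', '.') in the query are skipped when counting residues.
--
--     Args:
--         query_row: The aligned query sequence (may contain gap characters).
--         position: 1-indexed residue position in the unaligned sequence.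
--         expected_aa: If provided, verify the amino acid at that position
--             matches. Returns None on mismatch.
--
--     Returns:
--         0-indexed column index in the alignment, or None if the position
--         is out of range or the reference amino acid does not match.
--     """
--     residue_count = 0
--     for col_idx, char in enumerate(query_row):
--         if char not in ("-", "."):
--             residue_count += 1
--             if residue_count == position:
--                 if expected_aa is not None and char.upper() != expected_aa.upper():
--                     return None
--                 return col_idx
--     # Position beyond sequence length
--     return None
-- ===== SOURCE B (Python) =====
-- from typing import Optional
--
--
-- def _map_position_to_column(
--     query_row: str,
--     position: int,
--     expected_aa: Optional[str] = None,
-- ) -> Optional[int]: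
--     """Table-building variant: collect all non-gap columns once, then index."""
--     cols = [(i, c) for i, c in enumerate(query_row) if c not in ("-", ".")]
--     if position < 1 or position > len(cols):
--         return None
--     col, char = cols[position - 1]
--     if expected_aa is not None and char.upper() != expected_aa.upper():
--         return None
--     return col
-- ===== Notes on version B (the rewrite author's own statement) =====
-- stated objective: alternative
-- what changed: Replaces A's counting scan with early exit by one filter pass that tabulates all non-gap (column, char) pairs, followed by an explicit range guard and direct indexing at position-1.
import Mathlib
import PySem

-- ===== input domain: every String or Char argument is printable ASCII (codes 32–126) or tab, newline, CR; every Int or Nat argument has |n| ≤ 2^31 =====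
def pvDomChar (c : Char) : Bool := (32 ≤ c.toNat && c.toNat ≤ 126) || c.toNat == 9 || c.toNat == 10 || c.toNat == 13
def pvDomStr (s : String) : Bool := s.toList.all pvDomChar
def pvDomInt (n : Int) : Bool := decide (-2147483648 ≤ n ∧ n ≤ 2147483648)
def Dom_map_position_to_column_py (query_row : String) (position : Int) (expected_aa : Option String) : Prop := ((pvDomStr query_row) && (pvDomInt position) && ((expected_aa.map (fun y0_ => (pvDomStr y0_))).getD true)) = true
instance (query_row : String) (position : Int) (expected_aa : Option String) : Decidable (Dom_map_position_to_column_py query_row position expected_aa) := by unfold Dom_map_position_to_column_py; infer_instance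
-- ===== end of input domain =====

-- B replaces A's counting early-exit scan by a single filter pass that tabulates all
-- non-gap (column, char) pairs, then an explicit range guard and O(1) indexing (objective: alternative decomposition).


-- ===== PORT A =====
-- A's for-loop over enumerate(query_row): count non-gap chars, return at count == position.
def pvGoA (position : Int) (expected_aa : Option String) : List (Int × Char) → Int → Option Int
  | [], _ => none
  | (i, c) :: rest, count =>
    if !(c == '-' || c == '.') then
      if count + 1 = position then
        match expected_aa with
        | some e => if String.ofList [PySem.Chars.upperChar c] ≠ PySem.Str.upper e then none else some i
        | none => some i
      else pvGoA position expected_aa rest (count + 1)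
    else pvGoA position expected_aa rest count

def map_position_to_column_py (query_row : String) (position : Int) (expected_aa : Option String) : Option Int :=
  pvGoA position expected_aa (PySem.List.enumerate query_row.toList) 0

-- ===== PORT B =====
def map_position_to_column_py_alt (query_row : String) (position : Int) (expected_aa : Option String) : Option Int :=
  let cols := (PySem.List.enumerate query_row.toList).filter (fun p => !(p.2 == '-' || p.2 == '.'))
  if position < 1 ∨ position > (cols.length : Int) then none
  else
    match PySem.List.pyGet? cols (position - 1) with
    | none => none
    | some (i, c) =>
      match expected_aa with
      | some e => if String.ofList [PySem.Chars.upperChar c] ≠ PySem.Str.upper e then none else some i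
      | none => some i

-- ===== PRECONDITION & SPEC =====
def Spec_map_position_to_column_py (query_row : String) (position : Int) (expected_aa : Option String) (out : Option Int) : Prop := out = map_position_to_column_py_alt query_row position expected_aa
instance (query_row : String) (position : Int) (expected_aa : Option String) (out : Option Int) : Decidable (Spec_map_position_to_column_py query_row position expected_aa out) := by unfold Spec_map_position_to_column_py; infer_instance

-- ===== CLAIM (what is proved, stated in full; the proofs are below) =====
def Claim_equal_map_position_to_column_py : Prop := ∀ (query_row : String) (position : Int) (expected_aa : Option String), Dom_map_position_to_column_py query_row position expected_aa → Spec_map_position_to_column_py query_row position expected_aa (map_position_to_column_py query_row position expected_aa)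

-- ===== LEMMAS AND PROOFS =====

-- the common "found it" action of both programs, used only to state the invariant
def pvCheck (expected_aa : Option String) (p : Int × Char) : Option Int :=
  match expected_aa with
  | some e => if String.ofList [PySem.Chars.upperChar p.2] ≠ PySem.Str.upper e then none else some p.1
  | none => some p.1

lemma pvGoA_eq (position : Int) (expected_aa : Option String) (l : List (Int × Char)) (count : Int) :
    pvGoA position expected_aa l count =
      (if position - count < 1 ∨ position - count >
          ((l.filter (fun p => !(p.2 == '-' || p.2 == '.'))).length : Int) then none
       else
         match (l.filter (fun p => !(p.2 == '-' || p.2 == '.')))[(position - count - 1).toNat]? with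
         | none => none
         | some p => pvCheck expected_aa p) := by
  induction l generalizing count with
  | nil => simp [pvGoA]
  | cons hd tl ih =>
    obtain ⟨i, c⟩ := hd
    by_cases hg : (!(c == '-' || c == '.')) = true
    · have hstep : pvGoA position expected_aa ((i, c) :: tl) count =
          (if count + 1 = position then pvCheck expected_aa (i, c)
           else pvGoA position expected_aa tl (count + 1)) := by
        cases expected_aa <;> simp [pvGoA, pvCheck, hg]
      rw [hstep, show ((i, c) :: tl).filter (fun p => !(p.2 == '-' || p.2 == '.')) =
          (i, c) :: tl.filter (fun p => !(p.2 == '-' || p.2 == '.')) by simp [List.filter, hg]]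
      set f := tl.filter (fun p => !(p.2 == '-' || p.2 == '.')) with hf
      have hlen : (((i, c) :: f).length : Int) = (f.length : Int) + 1 := by
        simp
      by_cases hp : count + 1 = position
      · rw [if_pos hp, if_neg (by rw [hlen]; omega)]
        have hz : (position - count - 1).toNat = 0 := by omega
        rw [hz, List.getElem?_cons_zero]
      · rw [if_neg hp, ih]
        by_cases hlo : position - count < 1 ∨ position - count > ((f.length : Int) + 1)
        · rw [if_pos (by omega), if_pos (by rw [hlen]; omega)]
        · rw [if_neg (by omega), if_neg (by rw [hlen]; omega)]
          have hk : (position - count - 1).toNat = (position - (count + 1) - 1).toNat + 1 := by omega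
          rw [hk, List.getElem?_cons_succ]
    · rw [show pvGoA position expected_aa ((i, c) :: tl) count =
          pvGoA position expected_aa tl count by simp [pvGoA, hg]]
      rw [show ((i, c) :: tl).filter (fun p => !(p.2 == '-' || p.2 == '.')) =
          tl.filter (fun p => !(p.2 == '-' || p.2 == '.')) by simp [List.filter, hg]]
      exact ih count

-- ===== VERDICT (by name: the statement is the Claim_ definition above) =====
theorem map_position_to_column_py_spec : Claim_equal_map_position_to_column_py := by
  intro query_row position expected_aa _
  unfold Spec_map_position_to_column_py map_position_to_column_py map_position_to_column_py_alt
  rw [pvGoA_eq]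
  set f := (PySem.List.enumerate query_row.toList).filter (fun p => !(p.2 == '-' || p.2 == '.')) with hf
  by_cases h : position < 1 ∨ position > (f.length : Int)
  · rw [if_pos (by omega), if_pos h]
  · rw [if_neg (by omega), if_neg h]
    rw [PySem.List.pyGet?_of_nonneg _ (by omega)]
    have : (position - 0 - 1).toNat = (position - 1).toNat := by omega
    rw [this]
    cases hx : f[(position - 1).toNat]? with
    | none => simp
    | some p => obtain ⟨i, c⟩ := p; simp [pvCheck]
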